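-- pv_equiv track=rewrite | github.com/99Cyborgs/SCIR | validators/wasm_subset_classifier.py | _subset_rejection_reason
-- ===== SOURCE A (Python) =====
-- def _subset_rejection_reason(features: list[str]) -> str:
--     if any(feature in {"imports_outside_allowed_shims", "helper_trampolines"} for feature in features):
--         return "helper_usage_outside_admitted_subset"
--     if "indirect_calls" in features:
--         return "indirect_calls_outside_admitted_subset"
--     if "reference_types" in features:
--         return "reference_types_outside_admitted_subset"
--     if "memory_growth" in features:
--         return "memory_growth_outside_admitted_subset"
--     if "mutable_globals" in features:
--         return "mutable_globals_outside_admitted_subset"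
--     return "unsupported_wasm_feature"
-- ===== SOURCE B (Python) =====
-- _PRIORITY = {
--     "imports_outside_allowed_shims": 0,
--     "helper_trampolines": 0,
--     "indirect_calls": 1,
--     "reference_types": 2,
--     "memory_growth": 3,
--     "mutable_globals": 4,
-- }
--
-- _REASONS = [
--     "helper_usage_outside_admitted_subset",
--     "indirect_calls_outside_admitted_subset",
--     "reference_types_outside_admitted_subset",
--     "memory_growth_outside_admitted_subset",
--     "mutable_globals_outside_admitted_subset",
--     "unsupported_wasm_feature",
-- ]
--
--
-- def _subset_rejection_reason(features: list[str]) -> str: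
--     # Single pass over features: keep the minimum severity rank seen, then
--     # map that rank to its reason. Rank 5 = no recognised feature.
--     best = 5
--     for f in features:
--         r = _PRIORITY.get(f, 5)
--         if r < best:
--             best = r
--     return _REASONS[best]
-- ===== Notes on version B (the rewrite author's own statement) =====
-- stated objective: alternative
-- what changed: Instead of A's ordered membership scans of the feature list per rule, B makes a single pass over the features computing the minimum priority rank via a dict lookup, then indexes a reason table with that rank.
import Mathlib
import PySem

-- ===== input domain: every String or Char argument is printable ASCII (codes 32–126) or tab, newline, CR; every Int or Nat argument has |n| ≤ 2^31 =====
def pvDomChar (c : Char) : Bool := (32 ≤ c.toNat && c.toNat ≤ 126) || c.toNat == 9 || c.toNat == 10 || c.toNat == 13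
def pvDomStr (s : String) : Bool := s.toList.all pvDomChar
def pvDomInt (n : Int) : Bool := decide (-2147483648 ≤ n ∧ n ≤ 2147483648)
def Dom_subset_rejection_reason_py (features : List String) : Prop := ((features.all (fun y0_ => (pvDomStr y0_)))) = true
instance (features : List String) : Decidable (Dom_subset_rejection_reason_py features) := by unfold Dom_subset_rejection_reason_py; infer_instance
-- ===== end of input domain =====

-- B replaces A's per-rule membership scans by one pass over the features keeping the minimum priority rank, then a table lookup; alternative decomposition, same cost.


-- ===== PORT A =====
-- literal transliteration of A's if-chain; `feature in {s1, s2}` is membership in a two-element literal set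
def subset_rejection_reason_py (features : List String) : String :=
  if features.any (fun feature =>
      feature == "imports_outside_allowed_shims" || feature == "helper_trampolines") then
    "helper_usage_outside_admitted_subset"
  else if features.contains "indirect_calls" then
    "indirect_calls_outside_admitted_subset"
  else if features.contains "reference_types" then
    "reference_types_outside_admitted_subset"
  else if features.contains "memory_growth" then
    "memory_growth_outside_admitted_subset"
  else if features.contains "mutable_globals" then
    "mutable_globals_outside_admitted_subset"
  else
    "unsupported_wasm_feature"

-- ===== PORT B =====
-- the _PRIORITY dict from Source B
def pvPriority : PySem.Dict String Nat :=
  PySem.Dict.ofList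
    [ ("imports_outside_allowed_shims", 0), ("helper_trampolines", 0),
      ("indirect_calls", 1), ("reference_types", 2),
      ("memory_growth", 3), ("mutable_globals", 4) ]

-- the _REASONS table from Source B
def pvReasons : List String :=
  [ "helper_usage_outside_admitted_subset",
    "indirect_calls_outside_admitted_subset",
    "reference_types_outside_admitted_subset",
    "memory_growth_outside_admitted_subset",
    "mutable_globals_outside_admitted_subset",
    "unsupported_wasm_feature" ]

-- Source B: one pass keeping the minimum rank, then _REASONS[best]
-- (the final indexing is exact via getD: best ≤ 5 < pvReasons.length always, so Python never raises)
def subset_rejection_reason_py_alt (features : List String) : String :=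
  let best := features.foldl
    (fun best f =>
      let r := pvPriority.getD f 5
      if r < best then r else best) 5
  pvReasons.getD best "unsupported_wasm_feature"

-- ===== PRECONDITION & SPEC =====
def Spec_subset_rejection_reason_py (features : List String) (out : String) : Prop := out = subset_rejection_reason_py_alt features
instance (features : List String) (out : String) : Decidable (Spec_subset_rejection_reason_py features out) := by unfold Spec_subset_rejection_reason_py; infer_instance

-- ===== CLAIM (what is proved, stated in full; the proofs are below) =====
def Claim_equal_subset_rejection_reason_py : Prop := ∀ (features : List String), Dom_subset_rejection_reason_py features → Spec_subset_rejection_reason_py features (subset_rejection_reason_py features)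

-- ===== LEMMAS AND PROOFS =====

-- the least rank present in the list, computed from memberships only
def pvPure (fs : List String) : Nat :=
  if fs.contains "imports_outside_allowed_shims" || fs.contains "helper_trampolines" then 0
  else if fs.contains "indirect_calls" then 1
  else if fs.contains "reference_types" then 2
  else if fs.contains "memory_growth" then 3
  else if fs.contains "mutable_globals" then 4
  else 5

theorem pvPure_le (fs : List String) : pvPure fs ≤ 5 := by
  unfold pvPure; split_ifs <;> omega

theorem pvGetRank_eq (x : String) :
    pvPriority.getD x 5 =
      (if "imports_outside_allowed_shims" == x then 0
       else if "helper_trampolines" == x then 0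
       else if "indirect_calls" == x then 1
       else if "reference_types" == x then 2
       else if "memory_growth" == x then 3
       else if "mutable_globals" == x then 4
       else 5) := by
  have hmk : pvPriority = PySem.Dict.mk
      [ ("imports_outside_allowed_shims", 0), ("helper_trampolines", 0),
        ("indirect_calls", 1), ("reference_types", 2),
        ("memory_growth", 3), ("mutable_globals", 4) ] := by decide
  rw [hmk]
  simp only [PySem.Dict.getD_eq_get?_getD, PySem.Dict.get?_mk_cons]
  split_ifs <;> simp [PySem.Dict.get?]

set_option maxHeartbeats 1000000 in
theorem pvPure_cons (x : String) (xs : List String) :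
    pvPure (x :: xs) = min (pvPriority.getD x 5) (pvPure xs) := by
  unfold pvPure
  rw [pvGetRank_eq]
  simp only [List.contains_cons, Bool.or_eq_true, beq_iff_eq]
  cases h1 : ("imports_outside_allowed_shims" == x) <;>
    cases h2 : ("helper_trampolines" == x) <;>
    cases h3 : ("indirect_calls" == x) <;>
    cases h4 : ("reference_types" == x) <;>
    cases h5 : ("memory_growth" == x) <;>
    cases h6 : ("mutable_globals" == x) <;>
    simp_all [BEq.comm] <;> split_ifs <;> simp_all

-- the fold in B computes the min of the accumulator and the list's least rank
theorem pvFold_eq_min (fs : List String) : ∀ (b : Nat), b ≤ 5 →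
    fs.foldl (fun best f =>
      let r := pvPriority.getD f 5
      if r < best then r else best) b = min b (pvPure fs) := by
  induction fs with
  | nil => intro b hb; simp [pvPure]; omega
  | cons x xs ih =>
      intro b hb
      simp only [List.foldl_cons]
      have hacc : (if pvPriority.getD x 5 < b then pvPriority.getD x 5 else b) ≤ 5 := by
        split_ifs <;> omega
      rw [ih _ hacc, pvPure_cons]
      by_cases h : pvPriority.getD x 5 < b <;> simp only [h, if_true, if_false] <;> omega

-- scanning the features for either of two strings = containing one of them
theorem pv_any_two (l : List String) (a b : String) :
    (l.any fun f => f == a || f == b) = (l.contains a || l.contains b) := by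
  induction l with
  | nil => rfl
  | cons x xs ih =>
      simp only [List.any_cons, ih, List.contains_cons]
      cases hxa : (x == a) <;> cases hxb : (x == b) <;> simp_all [BEq.comm, beq_iff_eq] <;> (try simp [beq_eq_decide, hxa, hxb])

-- ===== VERDICT (by name: the statement is the Claim_ definition above) =====
theorem subset_rejection_reason_py_spec : Claim_equal_subset_rejection_reason_py := by
  intro features _
  unfold Spec_subset_rejection_reason_py subset_rejection_reason_py subset_rejection_reason_py_alt
  rw [pvFold_eq_min _ 5 (by omega)]
  have h5 : min 5 (pvPure features) = pvPure features := by
    have := pvPure_le features; omega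
  rw [h5, pv_any_two]
  unfold pvPure
  split_ifs <;> rfl
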